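-- pv_equiv track=rewrite | github.com/EDaley-FlemCollege/CryptographyScripts | DynamicSBox.py | interate_bits
-- ===== SOURCE A (Python) =====
-- def interate_bits(bit_string):
--     result = []
--     reps = len(bit_string)//2
--     for i in range(reps):
--         bit1 = bit_string[i]
--         bit2 = bit_string[i+reps]
--         bit1 = int(bit1, 2)
--         bit2 = int(bit2, 2)
--         xored = bit1^bit2
--         result.append(str(xored))
--     if len(bit_string)%2 == 1:
--         result.append(bit_string[-1])
--     end_bits = bit_string + ''.join(result)
--     return end_bits
-- ===== SOURCE B (Python) =====
-- def interate_bits(bit_string):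
--     reps = len(bit_string) // 2
--     if reps > 0:
--         x = int(bit_string[:reps], 2) ^ int(bit_string[reps:2*reps], 2)
--         xor_part = format(x, '0{}b'.format(reps))
--     else:
--         xor_part = ''
--     tail = bit_string[-1] if len(bit_string) % 2 == 1 else ''
--     return bit_string + xor_part + tail
-- ===== Notes on version B (the rewrite author's own statement) =====
-- stated objective: faster
-- what changed: Replaces the per-character int()/xor/str() index loop by parsing the two halves as whole binary integers, xoring once, and re-rendering the result zero-padded to half-length.
import Mathlib
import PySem

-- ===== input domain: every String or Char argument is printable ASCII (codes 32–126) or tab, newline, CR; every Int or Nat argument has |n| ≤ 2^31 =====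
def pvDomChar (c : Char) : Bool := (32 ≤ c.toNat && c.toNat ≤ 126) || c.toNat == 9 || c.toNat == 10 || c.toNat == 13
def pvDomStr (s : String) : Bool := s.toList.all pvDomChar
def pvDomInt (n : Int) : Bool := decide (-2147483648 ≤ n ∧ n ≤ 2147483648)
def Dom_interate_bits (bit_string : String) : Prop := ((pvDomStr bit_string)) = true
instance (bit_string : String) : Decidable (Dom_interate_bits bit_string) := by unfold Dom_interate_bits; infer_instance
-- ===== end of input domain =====

-- B replaces A's per-character int/xor/str loop by parsing the two halves as binary
-- integers, xoring them once and re-rendering zero-padded (whole-number arithmetic).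

-- ===== PORT A =====
def interate_bits (bit_string : String) : String :=
  let l := bit_string.toList
  let reps : Int := PySem.Int.floordiv (l.length : Int) 2
  let result : List Char :=
    (PySem.List.pyRange 0 reps 1).foldl
      (fun acc i =>
        let bit1 := PySem.List.pyGetD l i ' '
        let bit2 := PySem.List.pyGetD l (i + reps) ' '
        -- int(bit, 2): total form via getD, exact under Pre_ (where int does not raise)
        let b1 : Int := (PySem.Int.ofStrBase? (String.mk [bit1]) 2).getD 0
        let b2 : Int := (PySem.Int.ofStrBase? (String.mk [bit2]) 2).getD 0
        let xored := PySem.Int.bxor b1 b2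
        acc ++ (PySem.Int.toStr xored).toList) []
  let result :=
    if PySem.Int.mod (l.length : Int) 2 = 1 then result ++ [PySem.List.pyGetD l (-1) ' ']
    else result
  String.mk (l ++ result)

-- ===== PORT B =====
-- int(s, 2): hand port, exact for nonempty strings of binary digit characters (guaranteed by Pre_)
def pvParseBin (cs : List Char) : Nat :=
  cs.foldl (fun a c => 2 * a + (if c = '1' then 1 else 0)) 0

-- format(x, '0{w}b'): fixed-width zero-padded binary; hand port, exact for 0 ≤ x < 2^w (guaranteed here)
def pvRenderBin : Nat → Nat → List Char
  | 0, _ => []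
  | w + 1, x => pvRenderBin w (x / 2) ++ [if x % 2 = 1 then '1' else '0']

def interate_bits_alt (bit_string : String) : String :=
  let l := bit_string.toList
  let reps := l.length / 2
  let xorPart :=
    if 0 < reps then
      pvRenderBin reps
        (pvParseBin (PySem.List.slice l none (some (reps : Int))) ^^^
         pvParseBin (PySem.List.slice l (some (reps : Int)) (some ((2 * reps : Nat) : Int))))
    else []
  let tail := if l.length % 2 = 1 then [PySem.List.pyGetD l (-1) ' '] else []
  String.mk (l ++ xorPart ++ tail)

-- ===== PRECONDITION & SPEC =====
-- Pre_ excludes exactly the inputs where A raises ValueError: a non-binary-digit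
-- character among the first 2*(len//2) positions (the ones A feeds to int(·, 2)).
def Pre_interate_bits (bit_string : String) : Prop :=
  ((bit_string.toList.take (2 * (bit_string.toList.length / 2))).all
    (fun c => c == '0' || c == '1')) = true
instance (bit_string : String) : Decidable (Pre_interate_bits bit_string) := by
  unfold Pre_interate_bits; infer_instance

def pvWitness_interate_bits : String := "01101"

def Spec_interate_bits (bit_string : String) (out : String) : Prop := out = interate_bits_alt bit_string
instance (bit_string : String) (out : String) : Decidable (Spec_interate_bits bit_string out) := by unfold Spec_interate_bits; infer_instance

-- ===== CLAIM (what is proved, stated in full; the proofs are below) =====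
def Claim_equal_interate_bits : Prop := ∀ (bit_string : String), Dom_interate_bits bit_string → Pre_interate_bits bit_string → Spec_interate_bits bit_string (interate_bits bit_string)

-- ===== LEMMAS AND PROOFS =====

-- bit value of a character, and the xor character A appends at each position
def pvBV (c : Char) : Nat := if c = '1' then 1 else 0
def pvXC (c d : Char) : Char := if (c = '1') != (d = '1') then '1' else '0'
-- LSB-first parse / render used by the proof
def pvPrl : List Char → Nat
  | [] => 0
  | c :: t => pvBV c + 2 * pvPrl t
def pvRendR : Nat → Nat → List Char
  | 0, _ => []
  | w + 1, x => (if x % 2 = 1 then '1' else '0') :: pvRendR w (x / 2)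
def pvBinL (l : List Char) : Prop := ∀ c ∈ l, c = '0' ∨ c = '1'

theorem pv_fdiv_nat (n : Nat) : PySem.Int.floordiv (n : Int) 2 = ((n / 2 : Nat) : Int) := by
  show Int.fdiv _ _ = _
  cases n <;> simp [Int.fdiv]

theorem pv_fmod_nat (n : Nat) : PySem.Int.mod (n : Int) 2 = ((n % 2 : Nat) : Int) := by
  show Int.fmod _ _ = _
  cases n <;> simp [Int.fmod]

theorem pv_char_step (c d : Char) (hc : c = '0' ∨ c = '1') (hd : d = '0' ∨ d = '1') :
    (PySem.Int.toStr (PySem.Int.bxor ((PySem.Int.ofStrBase? (String.mk [c]) 2).getD 0)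
      ((PySem.Int.ofStrBase? (String.mk [d]) 2).getD 0))).toList = [pvXC c d] := by
  rcases hc with rfl | rfl <;> rcases hd with rfl | rfl <;> decide

theorem pvPrl_append (t : List Char) (c : Char) :
    pvPrl (t ++ [c]) = pvPrl t + pvBV c * 2 ^ t.length := by
  induction t with
  | nil => simp [pvPrl]
  | cons a t ih => simp [pvPrl, ih, List.length_cons]; ring

theorem pvParse_foldl (l : List Char) (a : Nat) :
    l.foldl (fun a c => 2 * a + (if c = '1' then 1 else 0)) a
      = a * 2 ^ l.length + pvPrl l.reverse := by
  induction l generalizing a with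
  | nil => simp [pvPrl]
  | cons c t ih =>
    simp only [List.foldl_cons, ih, List.reverse_cons, pvPrl_append, List.length_reverse,
      List.length_cons, pvBV]
    ring

theorem pvParse_prl (l : List Char) : pvParseBin l = pvPrl l.reverse := by
  simpa using pvParse_foldl l 0

theorem pv_bit_xor (x y a b : Nat) (hx : x < 2) (hy : y < 2) :
    (x + 2 * a) ^^^ (y + 2 * b) = (x ^^^ y) + 2 * (a ^^^ b) := by
  interval_cases x <;> interval_cases y <;>
    [ (have h := Nat.xor_bit false a false b);
      (have h := Nat.xor_bit false a true b);
      (have h := Nat.xor_bit true a false b);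
      (have h := Nat.xor_bit true a true b) ] <;>
    simpa [Nat.bit_val, Nat.add_comm] using h

theorem pvBV_lt (c : Char) : pvBV c < 2 := by
  unfold pvBV; split <;> omega

theorem pv_main_rev (r1 r2 : List Char) (hlen : r1.length = r2.length)
    (h1 : pvBinL r1) (h2 : pvBinL r2) :
    pvRendR r1.length (pvPrl r1 ^^^ pvPrl r2) = List.zipWith pvXC r1 r2 := by
  induction r1 generalizing r2 with
  | nil => cases r2 <;> simp_all [pvRendR]
  | cons c1 t1 ih =>
    cases r2 with
    | nil => simp at hlen
    | cons c2 t2 =>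
      have hv : pvPrl (c1 :: t1) ^^^ pvPrl (c2 :: t2)
          = (pvBV c1 ^^^ pvBV c2) + 2 * (pvPrl t1 ^^^ pvPrl t2) := by
        simpa [pvPrl] using pv_bit_xor (pvBV c1) (pvBV c2) (pvPrl t1) (pvPrl t2)
          (pvBV_lt c1) (pvBV_lt c2)
      have hxlt : pvBV c1 ^^^ pvBV c2 < 2 := by
        have a := pvBV_lt c1; have b := pvBV_lt c2
        interval_cases (pvBV c1) <;> interval_cases (pvBV c2) <;> decide
      have hmod : ((pvBV c1 ^^^ pvBV c2) + 2 * (pvPrl t1 ^^^ pvPrl t2)) % 2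
          = pvBV c1 ^^^ pvBV c2 := by omega
      have hdiv : ((pvBV c1 ^^^ pvBV c2) + 2 * (pvPrl t1 ^^^ pvPrl t2)) / 2
          = pvPrl t1 ^^^ pvPrl t2 := by omega
      have hc1 : c1 = '0' ∨ c1 = '1' := h1 c1 (by simp)
      have hc2 : c2 = '0' ∨ c2 = '1' := h2 c2 (by simp)
      have hhead : (if ((pvBV c1 ^^^ pvBV c2) + 2 * (pvPrl t1 ^^^ pvPrl t2)) % 2 = 1
          then '1' else '0') = pvXC c1 c2 := by
        rw [hmod]
        rcases hc1 with rfl | rfl <;> rcases hc2 with rfl | rfl <;> rfl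
      have ht : pvRendR t1.length (pvPrl t1 ^^^ pvPrl t2) = List.zipWith pvXC t1 t2 :=
        ih t2 (by simpa using hlen) (fun c hc => h1 c (by simp [hc]))
          (fun c hc => h2 c (by simp [hc]))
      simp only [List.length_cons, pvRendR, hv, hhead, hdiv, ht, List.zipWith_cons_cons]

theorem pvRender_rev (w : Nat) (x : Nat) : pvRenderBin w x = (pvRendR w x).reverse := by
  induction w generalizing x with
  | zero => rfl
  | succ w ih => simp [pvRenderBin, pvRendR, ih]

theorem pv_main (l1 l2 : List Char) (hlen : l1.length = l2.length)
    (h1 : pvBinL l1) (h2 : pvBinL l2) :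
    pvRenderBin l1.length (pvParseBin l1 ^^^ pvParseBin l2) = List.zipWith pvXC l1 l2 := by
  rw [pvRender_rev, pvParse_prl, pvParse_prl, show l1.length = l1.reverse.length by simp,
    pv_main_rev l1.reverse l2.reverse (by simp [hlen])
      (fun c hc => h1 c (by simpa using hc)) (fun c hc => h2 c (by simpa using hc)),
    ← List.reverse_zipWith (by simp [hlen]), List.reverse_reverse]

theorem pvA_loop (l : List Char) (hpre : pvBinL (l.take (2 * (l.length / 2)))) :
    (PySem.List.pyRange 0 ((l.length / 2 : Nat) : Int) 1).foldl
      (fun acc i =>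
        acc ++ (PySem.Int.toStr (PySem.Int.bxor
          ((PySem.Int.ofStrBase? (String.mk [PySem.List.pyGetD l i ' ']) 2).getD 0)
          ((PySem.Int.ofStrBase? (String.mk [PySem.List.pyGetD l (i + ((l.length / 2 : Nat) : Int)) ' ']) 2).getD 0))).toList) []
      = List.zipWith pvXC (l.take (l.length / 2)) ((l.drop (l.length / 2)).take (l.length / 2)) := by
  have hbin : ∀ k : Nat, ∀ _hk : k < 2 * (l.length / 2), l.getD k ' ' = l[k]'(by omega) ∧
      (l[k]'(by omega) = '0' ∨ l[k]'(by omega) = '1') := by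
    intro k hk
    have hkl : k < l.length := by omega
    refine ⟨List.getD_eq_getElem l ' ' hkl, hpre _ ?_⟩
    exact List.mem_take_iff_getElem.mpr ⟨k, by omega, rfl⟩
  rw [PySem.List.foldl_congr_mem _ _
    (fun acc i => acc ++ [pvXC (PySem.List.pyGetD l i ' ')
        (PySem.List.pyGetD l (i + ((l.length / 2 : Nat) : Int)) ' ')]) _ ?_]
  · rw [PySem.List.foldl_append_singleton_eq_map, List.nil_append]
    apply List.ext_getElem
    · simp [PySem.List.length_pyRange_one]
      omega
    · intro k hk1 hk2
      have hr : k < l.length / 2 := by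
        have h := hk1
        simp only [List.length_map, PySem.List.length_pyRange_one] at h
        omega
      rw [List.getElem_map, List.getElem_zipWith]
      simp only [PySem.List.getElem_pyRange_one, zero_add]
      have e1 : PySem.List.pyGetD l ((k : Nat) : Int) ' ' = l[k]'(by omega) := by
        rw [PySem.List.pyGetD_natCast, (hbin k (by omega)).1]
      have e2 : PySem.List.pyGetD l (((k : Nat) : Int) + ((l.length / 2 : Nat) : Int)) ' '
          = l[k + l.length / 2]'(by omega) := by
        rw [show ((k : Nat) : Int) + ((l.length / 2 : Nat) : Int) = ((k + l.length / 2 : Nat) : Int) by push_cast; ring,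
          PySem.List.pyGetD_natCast, (hbin (k + l.length / 2) (by omega)).1]
      rw [e1, e2]
      congr 1
      · simp [List.getElem_take]
      · simp [List.getElem_take, List.getElem_drop]
        congr 1
        omega
  · intro acc i hi
    rcases PySem.List.mem_pyRange_one.mp hi with ⟨h0, hlt⟩
    have hkn : i.toNat < l.length / 2 := by omega
    have e1 : PySem.List.pyGetD l i ' ' = l[i.toNat]'(by omega) := by
      rw [PySem.List.pyGetD_of_nonneg _ _ h0, (hbin i.toNat (by omega)).1]
    have e2 : PySem.List.pyGetD l (i + ((l.length / 2 : Nat) : Int)) ' '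
        = l[i.toNat + l.length / 2]'(by omega) := by
      rw [PySem.List.pyGetD_of_nonneg _ _ (by omega),
        show (i + ((l.length / 2 : Nat) : Int)).toNat = i.toNat + l.length / 2 by omega,
        (hbin (i.toNat + l.length / 2) (by omega)).1]
    simp only [e1, e2, pv_char_step _ _ (hbin i.toNat (by omega)).2
      (hbin (i.toNat + l.length / 2) (by omega)).2]

theorem pv_final (s : String) (hpre0 : Pre_interate_bits s) :
    interate_bits s = interate_bits_alt s := by
  have hpre : ∀ c ∈ s.toList.take (2 * (s.toList.length / 2)), c = '0' ∨ c = '1' := by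
    intro c hc
    have := List.all_eq_true.mp hpre0 c hc
    simpa using this
  unfold interate_bits interate_bits_alt
  simp only [pv_fdiv_nat, pv_fmod_nat]
  set l := s.toList with hl
  set r := l.length / 2 with hr
  have hZ := pvA_loop l hpre
  rw [show (l.length / 2 : Nat) = r from rfl] at hZ
  have hls : l.length = s.toList.length := rfl
  have h1bin : pvBinL (l.take r) := by
    intro c hc
    exact hpre c ((List.take_prefix_take_left (i := r) (j := 2 * (l.length / 2)) (by omega)).subset hc)
  have h2bin : pvBinL ((l.drop r).take r) := by
    intro c hc
    rcases List.mem_take_iff_getElem.mp hc with ⟨k, hk, rfl⟩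
    simp only [List.getElem_drop]
    have hk1 : k < r := (lt_min_iff.mp hk).1
    have hk2 : k < l.length - r := by
      have h2 := (lt_min_iff.mp hk).2
      simpa using h2
    have hkr : k < r ∧ r + k < l.length := ⟨hk1, by omega⟩
    exact hpre _ (List.mem_take_iff_getElem.mpr ⟨r + k, by omega, rfl⟩)
  have h1len : (l.take r).length = r := by
    simp only [List.length_take]
    omega
  have hxor : (if 0 < r then
        pvRenderBin r
          (pvParseBin (PySem.List.slice l none (some (r : Int))) ^^^
            pvParseBin (PySem.List.slice l (some (r : Int)) (some ((2 * r : Nat) : Int))))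
      else []) = List.zipWith pvXC (l.take r) ((l.drop r).take r) := by
    by_cases h : 0 < r
    · have hm := pv_main (l.take r) ((l.drop r).take r)
        (by simp only [List.length_take, List.length_drop]; omega) h1bin h2bin
      rw [h1len] at hm
      rw [if_pos h, PySem.List.slice_to_natCast, PySem.List.slice_natCast,
        show 2 * r - r = r from by omega]
      exact hm
    · rw [if_neg h]
      have h0 : r = 0 := by omega
      simp [h0]
  rw [hZ, hxor]
  have hcond : ((l.length % 2 : Nat) : Int) = 1 ↔ l.length % 2 = 1 := by omega
  by_cases hodd : l.length % 2 = 1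
  · rw [if_pos (hcond.mpr hodd), if_pos hodd, ← List.append_assoc]
  · rw [if_neg (fun h => hodd (hcond.mp h)), if_neg hodd, List.append_nil]

-- ===== VERDICT (by name: the statement is the Claim_ definition above) =====
theorem interate_bits_spec : Claim_equal_interate_bits := by
  intro s _ hpre
  show interate_bits s = interate_bits_alt s
  exact pv_final s hpre
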